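-- pv_equiv track=rewrite | github.com/TeekometDev/adventofcode2023 | day14/day14.py | calculate_weight_north
-- ===== SOURCE A (Python) =====
-- def calculate_weight_north(input_data: [str]) -> int:
--     nr_of_columns = len(input_data[0])
--     nr_of_lines = len(input_data)
--     weight = 0
--     for column_nr in range(nr_of_columns - 1):
--         column = create_prototype_line(nr_of_lines)
--         cache_of_stones = 0
--         for inverted_line_nr in range(nr_of_lines):
--             line_number = nr_of_lines - inverted_line_nr - 1
--             if input_data[line_number][column_nr] == '.':
--                 continue
--             if input_data[line_number][column_nr] == 'O':
--                 cache_of_stones += 1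
--             if input_data[line_number][column_nr] == '#':
--                 column = column[:line_number] + '#' + column[line_number+1:]
--                 for stone in range(cache_of_stones):
--                     index_nr = line_number + 1 + stone
--                     column = column[:index_nr] + 'O' + column[index_nr+1:]
--                 cache_of_stones = 0
--         if cache_of_stones > 0:
--             for stone in range(cache_of_stones):
--                     column = column[:stone] + 'O' + column[stone+1:]
--         weight += get_column_weight_north(column)
--     return weight
--
-- def get_column_weight_north(input_data: str) -> int:
--     res_value = 0
--     for element_nr, element in enumerate(input_data):
--         if (element) == 'O':
--             res_value += len(input_data) - element_nr
--     return res_value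
--
-- def create_prototype_line(size: int) -> str:
--     line = ''
--     for nr in range(size):
--         line += '.'
--     return line
-- ===== SOURCE B (Python) =====
-- # Direct weight accumulation: per column, track the next free (northmost) row a
-- # rolling stone would settle into; no prototype string, no splicing.
-- # The column range (range(nr_of_columns - 1)) is A's and is preserved as the spec.
-- def calculate_weight_north(input_data: [str]) -> int:
--     nr_of_lines = len(input_data)
--     nr_of_columns = len(input_data[0])
--     weight = 0
--     for column_nr in range(nr_of_columns - 1):
--         next_free = 0
--         for line_nr in range(nr_of_lines):
--             ch = input_data[line_nr][column_nr]
--             if ch == '#':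
--                 next_free = line_nr + 1
--             elif ch == 'O':
--                 weight += nr_of_lines - next_free
--                 next_free += 1
--     return weight
-- ===== Notes on version B (the rewrite author's own statement) =====
-- stated objective: faster
-- what changed: Instead of rebuilding each column string bottom-up with slicing and then re-scanning it for weights, B scans each column top-down once, tracking the next free settling row and adding each stone's weight directly.
import Mathlib
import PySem

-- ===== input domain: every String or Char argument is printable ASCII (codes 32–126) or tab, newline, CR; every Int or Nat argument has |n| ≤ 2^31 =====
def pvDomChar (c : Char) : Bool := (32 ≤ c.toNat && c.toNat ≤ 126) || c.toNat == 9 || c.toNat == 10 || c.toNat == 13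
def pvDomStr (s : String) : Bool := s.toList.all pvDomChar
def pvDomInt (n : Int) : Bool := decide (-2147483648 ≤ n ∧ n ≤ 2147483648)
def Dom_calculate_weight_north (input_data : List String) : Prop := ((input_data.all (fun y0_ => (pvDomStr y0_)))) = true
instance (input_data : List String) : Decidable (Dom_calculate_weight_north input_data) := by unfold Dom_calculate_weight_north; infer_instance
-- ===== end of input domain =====

-- B replaces A's per-column string rebuilding by a single top-down pass that adds each
-- stone's weight directly (objective: faster); A's column range (nr_of_columns - 1) is kept.

-- ===== PORT A =====
-- Python strings built/sliced by A are ported as List Char (PySem.Chars domain).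
def create_prototype_line (size : Int) : List Char :=
  (PySem.List.pyRange 0 size 1).foldl (fun line _ => line ++ ['.']) []

def get_column_weight_north (input_data : List Char) : Int :=
  (PySem.List.enumerate input_data 0).foldl
    (fun res_value p => if p.2 = 'O' then res_value + ((input_data.length : Int) - p.1) else res_value) 0

def calculate_weight_north (input_data : List String) : Int :=
  let nr_of_columns : Int := ((PySem.List.pyGetD input_data 0 "").toList.length : Int)
  let nr_of_lines : Int := (input_data.length : Int)
  (PySem.List.pyRange 0 (nr_of_columns - 1) 1).foldl (fun weight column_nr =>
    let res := (PySem.List.pyRange 0 nr_of_lines 1).foldl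
      (fun (st : List Char × Int) inverted_line_nr =>
        let line_number := nr_of_lines - inverted_line_nr - 1
        let cell := PySem.List.pyGetD (PySem.List.pyGetD input_data line_number "").toList column_nr ' '
        if cell = '.' then st
        else
          let st1 := if cell = 'O' then (st.1, st.2 + 1) else st
          if cell = '#' then
            let col1 := PySem.List.slice st1.1 none (some line_number) ++ ['#'] ++
                        PySem.List.slice st1.1 (some (line_number + 1)) none
            let col2 := (PySem.List.pyRange 0 st1.2 1).foldl
              (fun column stone =>
                let index_nr := line_number + 1 + stone
                PySem.List.slice column none (some index_nr) ++ ['O'] ++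
                PySem.List.slice column (some (index_nr + 1)) none) col1
            (col2, 0)
          else st1)
      (create_prototype_line nr_of_lines, 0)
    let column := if res.2 > 0 then
        (PySem.List.pyRange 0 res.2 1).foldl
          (fun column stone =>
            PySem.List.slice column none (some stone) ++ ['O'] ++
            PySem.List.slice column (some (stone + 1)) none) res.1
      else res.1
    weight + get_column_weight_north column) 0

-- ===== PORT B =====
def calculate_weight_north_alt (input_data : List String) : Int :=
  let nr_of_lines : Int := (input_data.length : Int)
  let nr_of_columns : Int := ((PySem.List.pyGetD input_data 0 "").toList.length : Int)
  (PySem.List.pyRange 0 (nr_of_columns - 1) 1).foldl (fun weight column_nr =>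
    ((PySem.List.pyRange 0 nr_of_lines 1).foldl
      (fun (st : Int × Int) line_nr =>
        let ch := PySem.List.pyGetD (PySem.List.pyGetD input_data line_nr "").toList column_nr ' '
        if ch = '#' then (st.1, line_nr + 1)
        else if ch = 'O' then (st.1 + (nr_of_lines - st.2), st.2 + 1)
        else st)
      (weight, 0)).1) 0

-- ===== PRECONDITION & SPEC =====
-- Exactly the inputs on which the Python A returns: a nonempty list whose every row is at
-- least len(input_data[0]) - 1 long (otherwise A raises IndexError).
def Pre_calculate_weight_north (input_data : List String) : Prop :=
  input_data ≠ [] ∧ ∀ s ∈ input_data, input_data.headI.toList.length ≤ s.toList.length + 1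
instance (input_data : List String) : Decidable (Pre_calculate_weight_north input_data) := by
  unfold Pre_calculate_weight_north; infer_instance

def pvWitness_calculate_weight_north : List String := ["OO.", ".#.", "O.O"]

def Spec_calculate_weight_north (input_data : List String) (out : Int) : Prop := out = calculate_weight_north_alt input_data
instance (input_data : List String) (out : Int) : Decidable (Spec_calculate_weight_north input_data out) := by unfold Spec_calculate_weight_north; infer_instance

-- ===== CLAIM (what is proved, stated in full; the proofs are below) =====
def Claim_equal_calculate_weight_north : Prop := ∀ (input_data : List String), Dom_calculate_weight_north input_data → Pre_calculate_weight_north input_data → Spec_calculate_weight_north input_data (calculate_weight_north input_data)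


-- ===== LEMMAS AND PROOFS =====

-- Weight of a column (list of cells, global index i at the head) for a grid of m lines.
def pvWAux (m : Int) (i : Int) : List Char → Int
  | [] => 0
  | ch :: rest => (if ch = 'O' then m - i else 0) + pvWAux m (i + 1) rest

-- Write k stones 'O' at positions a, a+1, ..., a+k-1.
def pvWS : List Char → Nat → Nat → List Char
  | s, _, 0 => s
  | s, a, Nat.succ k => pvWS (s.set a 'O') (a + 1) k

-- A's bottom-up settling machine on a column (head processed last), abstracted
-- from string slicing to List.set / pvWS.
def pvRun : List Char → Nat → List Char → List Char × Nat
  | [], _, s => (s, 0)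
  | ch :: rest, off, s =>
    let p := pvRun rest (off + 1) s
    if ch = '#' then (pvWS (p.1.set off '#') (off + 1) p.2, 0)
    else if ch = 'O' then (p.1, p.2 + 1)
    else p

-- B's top-down weight accumulator on a column: r = current row, nf = next free row.
def pvTw (m : Int) : Int → Int → List Char → Int
  | _, _, [] => 0
  | r, nf, ch :: rest =>
    if ch = '#' then pvTw m (r + 1) (r + 1) rest
    else if ch = 'O' then (m - nf) + pvTw m (r + 1) (nf + 1) rest
    else pvTw m (r + 1) nf rest

theorem pvTw_hash (m r nf : Int) (rest : List Char) :
    pvTw m r nf ('#' :: rest) = pvTw m (r + 1) (r + 1) rest := by simp [pvTw]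

theorem pvTw_O (m r nf : Int) (rest : List Char) :
    pvTw m r nf ('O' :: rest) = (m - nf) + pvTw m (r + 1) (nf + 1) rest := by simp [pvTw]

theorem pvTw_other (m r nf : Int) (ch : Char) (rest : List Char) (h1 : ch ≠ '#') (h2 : ch ≠ 'O') :
    pvTw m r nf (ch :: rest) = pvTw m (r + 1) nf rest := by simp [pvTw, h1, h2]

theorem pvWS_zero (s : List Char) (a : Nat) : pvWS s a 0 = s := rfl

theorem pvWS_succ (s : List Char) (a k : Nat) : pvWS s a (k + 1) = pvWS (s.set a 'O') (a + 1) k := rfl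

theorem pvRun_cons_hash (rest : List Char) (off : Nat) (s : List Char) :
    pvRun ('#' :: rest) off s
      = (pvWS ((pvRun rest (off + 1) s).1.set off '#') (off + 1) (pvRun rest (off + 1) s).2, 0) := by
  simp [pvRun]

theorem pvRun_cons_O (rest : List Char) (off : Nat) (s : List Char) :
    pvRun ('O' :: rest) off s = ((pvRun rest (off + 1) s).1, (pvRun rest (off + 1) s).2 + 1) := by
  simp [pvRun]

theorem pvRun_cons_other (ch : Char) (rest : List Char) (off : Nat) (s : List Char)
    (h1 : ch ≠ '#') (h2 : ch ≠ 'O') : pvRun (ch :: rest) off s = pvRun rest (off + 1) s := by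
  simp [pvRun, h1, h2]

theorem pvWAux_replicate (m : Int) (n : Nat) : ∀ (i : Int), pvWAux m i (List.replicate n '.') = 0 := by
  induction n with
  | zero => intro i; simp [pvWAux]
  | succ k ih => intro i; simp [List.replicate_succ, pvWAux, ih]

theorem pvWAux_set (m : Int) : ∀ (s : List Char) (p : Nat) (i : Int) (ch : Char),
    s[p]? = some '.' →
    pvWAux m i (s.set p ch) = pvWAux m i s + (if ch = 'O' then m - (i + p) else 0) := by
  intro s
  induction s with
  | nil => intro p i ch h; simp at h
  | cons a t ih =>
    intro p i ch h
    cases p with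
    | zero =>
      simp only [List.getElem?_cons_zero, Option.some.injEq] at h
      subst h
      simp [pvWAux, List.set]
      split <;> ring
    | succ q =>
      simp only [List.getElem?_cons_succ] at h
      have hset : (a :: t).set (q + 1) ch = a :: t.set q ch := rfl
      rw [hset]
      simp only [pvWAux]
      rw [ih q (i + 1) ch h]
      by_cases hch : ch = 'O'
      · simp only [hch]; push_cast; ring
      · simp [hch]

theorem pv_gcw_aux (m : Int) : ∀ (s : List Char) (i acc : Int),
    (PySem.List.enumerate s i).foldl
      (fun r p => if p.2 = 'O' then r + (m - p.1) else r) acc = acc + pvWAux m i s := by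
  intro s
  induction s with
  | nil => intro i acc; simp [PySem.List.enumerate_nil, pvWAux]
  | cons a t ih =>
    intro i acc
    rw [PySem.List.enumerate_cons]
    simp only [List.foldl_cons, ih, pvWAux]
    split <;> ring

theorem pv_gcw (s : List Char) : get_column_weight_north s = pvWAux (s.length : Int) 0 s := by
  unfold get_column_weight_north
  rw [pv_gcw_aux]; ring

theorem pv_foldl_dots (l : List Int) : ∀ (init : List Char),
    l.foldl (fun acc _ => acc ++ ['.']) init = init ++ List.replicate l.length '.' := by
  induction l with
  | nil => intro init; simp
  | cons a t ih =>
    intro init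
    rw [List.foldl_cons, ih, List.length_cons, List.replicate_succ']
    have h2 : ['.'] ++ List.replicate t.length ('.' : Char)
        = List.replicate t.length ('.' : Char) ++ ['.'] := by
      rw [List.singleton_append, ← List.replicate_succ, List.replicate_succ']
    rw [List.append_assoc, h2]

theorem pv_proto (n : Nat) : create_prototype_line (n : Int) = List.replicate n '.' := by
  unfold create_prototype_line
  rw [pv_foldl_dots]
  simp [PySem.List.length_pyRange_one]

theorem pvWS_length : ∀ (k : Nat) (s : List Char) (a : Nat), (pvWS s a k).length = s.length := by
  intro k
  induction k with
  | zero => intro s a; rfl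
  | succ q ih => intro s a; simp [pvWS, ih]

theorem pvWS_getElem?_lt : ∀ (k : Nat) (s : List Char) (a i : Nat), i < a →
    (pvWS s a k)[i]? = s[i]? := by
  intro k
  induction k with
  | zero => intro s a i _; rfl
  | succ q ih =>
    intro s a i h
    simp only [pvWS]
    rw [ih _ (a + 1) i (by omega), List.getElem?_set_ne (by omega)]

theorem pvWS_set_comm : ∀ (k : Nat) (s : List Char) (a p : Nat) (ch : Char), p < a →
    pvWS (s.set p ch) a k = (pvWS s a k).set p ch := by
  intro k
  induction k with
  | zero => intro s a p ch _; rfl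
  | succ q ih =>
    intro s a p ch h
    simp only [pvWS]
    rw [List.set_comm _ _ (by omega), ih _ (a + 1) p ch (by omega)]

theorem pvRun_length : ∀ (cells : List Char) (off : Nat) (s : List Char),
    (pvRun cells off s).1.length = s.length := by
  intro cells
  induction cells with
  | nil => intro off s; rfl
  | cons ch rest ih =>
    intro off s
    simp only [pvRun]
    split
    · simp [pvWS_length, ih]
    · split <;> simp [ih]

theorem pvRun_cache_le : ∀ (cells : List Char) (off : Nat) (s : List Char),
    (pvRun cells off s).2 ≤ cells.length := by
  intro cells
  induction cells with
  | nil => intro off s; simp [pvRun]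
  | cons ch rest ih =>
    intro off s
    simp only [pvRun]
    split
    · simp
    · split
      · have := ih (off + 1) s; simp; omega
      · have := ih (off + 1) s; simp; omega

theorem pvRun_getElem?_lt : ∀ (cells : List Char) (off : Nat) (s : List Char) (i : Nat), i < off →
    (pvRun cells off s).1[i]? = s[i]? := by
  intro cells
  induction cells with
  | nil => intro off s i _; rfl
  | cons ch rest ih =>
    intro off s i h
    simp only [pvRun]
    split
    · rw [pvWS_getElem?_lt _ _ _ _ (by omega), List.getElem?_set_ne (by omega),
        ih (off + 1) s i (by omega)]
    · split <;> exact ih (off + 1) s i (by omega)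

theorem pvRun_wAux (m : Int) : ∀ (cells : List Char) (off nf : Nat) (s : List Char),
    nf ≤ off → off + cells.length ≤ s.length →
    (∀ i : Nat, nf ≤ i → i < off + cells.length → s[i]? = some '.') →
    pvWAux m 0 (pvWS (pvRun cells off s).1 nf (pvRun cells off s).2) =
      pvWAux m 0 s + pvTw m (off : Int) (nf : Int) cells := by
  intro cells
  induction cells with
  | nil => intro off nf s _ _ _; simp [pvRun, pvWS, pvTw]
  | cons ch rest ih =>
    intro off nf s hno hlen hfresh
    have hlen' : (off + 1) + rest.length ≤ s.length := by
      simp only [List.length_cons] at hlen; omega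
    have hcache := pvRun_cache_le rest (off + 1) s
    have hrl := pvRun_length rest (off + 1) s
    by_cases h1 : ch = '#'
    · subst h1
      rw [pvRun_cons_hash]
      have hset : pvWS ((pvRun rest (off + 1) s).1.set off '#') (off + 1) (pvRun rest (off + 1) s).2
          = (pvWS (pvRun rest (off + 1) s).1 (off + 1) (pvRun rest (off + 1) s).2).set off '#' :=
        pvWS_set_comm _ _ _ _ _ (by omega)
      rw [pvWS_zero, hset]
      have hdot : (pvWS (pvRun rest (off + 1) s).1 (off + 1) (pvRun rest (off + 1) s).2)[off]? = some '.' := by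
        rw [pvWS_getElem?_lt _ _ _ _ (by omega), pvRun_getElem?_lt _ _ _ _ (by omega)]
        exact hfresh off hno (by simp only [List.length_cons]; omega)
      rw [pvWAux_set m _ off 0 '#' hdot]
      rw [ih (off + 1) (off + 1) s (le_refl _) hlen'
        (fun i hi1 hi2 => hfresh i (by omega) (by simp only [List.length_cons]; omega))]
      rw [pvTw_hash]
      push_cast; ring
    · by_cases h2 : ch = 'O'
      · subst h2
        rw [pvRun_cons_O]
        rw [show ((pvRun rest (off + 1) s).1, (pvRun rest (off + 1) s).2 + 1).2
            = (pvRun rest (off + 1) s).2 + 1 from rfl]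
        rw [show ((pvRun rest (off + 1) s).1, (pvRun rest (off + 1) s).2 + 1).1
            = (pvRun rest (off + 1) s).1 from rfl]
        rw [pvWS_succ, pvWS_set_comm _ _ _ _ _ (by omega)]
        have hdot : (pvWS (pvRun rest (off + 1) s).1 (nf + 1) (pvRun rest (off + 1) s).2)[nf]? = some '.' := by
          rw [pvWS_getElem?_lt _ _ _ _ (by omega), pvRun_getElem?_lt _ _ _ _ (by omega)]
          exact hfresh nf (le_refl _) (by simp only [List.length_cons]; omega)
        rw [pvWAux_set m _ nf 0 'O' hdot]
        rw [ih (off + 1) (nf + 1) s (by omega) hlen'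
          (fun i hi1 hi2 => hfresh i (by omega) (by simp only [List.length_cons]; omega))]
        rw [pvTw_O]
        push_cast; ring
      · rw [pvRun_cons_other ch rest off s h1 h2]
        rw [ih (off + 1) nf s (by omega) hlen'
          (fun i hi1 hi2 => hfresh i (by omega) (by simp only [List.length_cons]; omega))]
        rw [pvTw_other m _ _ ch rest h1 h2]
        push_cast; ring

theorem pv_set_slices (s : List Char) (n : Nat) (ch : Char) (h : n < s.length) :
    PySem.List.slice s none (some (n : Int)) ++ [ch] ++ PySem.List.slice s (some ((n : Int) + 1)) none
      = s.set n ch := by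
  rw [PySem.List.slice_to_natCast, show ((n : Int) + 1) = (((n + 1 : Nat)) : Int) by push_cast; ring,
    PySem.List.slice_from_natCast, List.set_eq_take_cons_drop ch h]
  simp

theorem pv_stone_fold : ∀ (k base : Nat) (col : List Char), base + k ≤ col.length →
    ((List.range k).map (Nat.cast : Nat → Int)).foldl
      (fun column stone => PySem.List.slice column none (some ((base : Int) + stone)) ++ ['O'] ++
        PySem.List.slice column (some ((base : Int) + stone + 1)) none) col
      = pvWS col base k := by
  intro k
  induction k with
  | zero => intro base col _; rfl
  | succ q ih =>
    intro base col h
    rw [List.range_succ_eq_map]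
    simp only [List.map_cons, List.foldl_cons, List.map_map]
    rw [show ((base : Int) + (0 : Nat)) = ((base : Nat) : Int) by push_cast; ring]
    rw [pv_set_slices col base 'O' (by omega)]
    have hmap : (List.range q).map ((Nat.cast : Nat → Int) ∘ Nat.succ)
        = ((List.range q).map (Nat.cast : Nat → Int)).map (fun x => x + 1) := by
      rw [List.map_map]
      apply List.map_congr_left; intro x _
      simp [Function.comp]
    rw [hmap, List.foldl_map]
    have hbody : (fun (column : List Char) (y : Int) =>
          PySem.List.slice column none (some ((base : Int) + (y + 1))) ++ ['O'] ++
          PySem.List.slice column (some ((base : Int) + (y + 1) + 1)) none)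
        = (fun column stone => PySem.List.slice column none (some (((base + 1 : Nat) : Int) + stone)) ++ ['O'] ++
          PySem.List.slice column (some (((base + 1 : Nat) : Int) + stone + 1)) none) := by
      funext column y
      rw [show ((base : Int) + (y + 1)) = (((base + 1 : Nat) : Int) + y) by push_cast; ring]
    rw [hbody, ih (base + 1) (col.set base 'O') (by simp only [List.length_set]; omega)]
    rfl

theorem pv_stone_fold_pyRange (k base : Nat) (col : List Char) (h : base + k ≤ col.length) :
    (PySem.List.pyRange 0 (k : Int) 1).foldl
      (fun column stone => PySem.List.slice column none (some ((base : Int) + stone)) ++ ['O'] ++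
        PySem.List.slice column (some ((base : Int) + stone + 1)) none) col
      = pvWS col base k := by
  rw [PySem.List.pyRange_zero_natCast]
  exact pv_stone_fold k base col h

-- A's per-step body on an explicit (line, cell) pair (state: column, cache).
def pvPairBody (st : List Char × Int) (p : Int × Char) : List Char × Int :=
  if p.2 = '.' then st
  else
    let st1 := if p.2 = 'O' then (st.1, st.2 + 1) else st
    if p.2 = '#' then
      (((PySem.List.pyRange 0 st1.2 1).foldl
        (fun column stone => PySem.List.slice column none (some (p.1 + 1 + stone)) ++ ['O'] ++
          PySem.List.slice column (some (p.1 + 1 + stone + 1)) none)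
        (PySem.List.slice st1.1 none (some p.1) ++ ['#'] ++
         PySem.List.slice st1.1 (some (p.1 + 1)) none)), 0)
    else st1

theorem pvPairBody_hash (st : List Char × Int) (i : Int) :
    pvPairBody st (i, '#')
      = (((PySem.List.pyRange 0 st.2 1).foldl
          (fun column stone => PySem.List.slice column none (some (i + 1 + stone)) ++ ['O'] ++
            PySem.List.slice column (some (i + 1 + stone + 1)) none)
          (PySem.List.slice st.1 none (some i) ++ ['#'] ++
           PySem.List.slice st.1 (some (i + 1)) none)), 0) := by
  simp [pvPairBody]

theorem pvPairBody_O (st : List Char × Int) (i : Int) :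
    pvPairBody st (i, 'O') = (st.1, st.2 + 1) := by
  simp [pvPairBody]

theorem pvPairBody_other (st : List Char × Int) (i : Int) (ch : Char)
    (h1 : ch ≠ '#') (h2 : ch ≠ 'O') : pvPairBody st (i, ch) = st := by
  by_cases h3 : ch = '.'
  · simp [pvPairBody, h3]
  · simp [pvPairBody, h1, h2, h3]

theorem pv_run_fold : ∀ (cells : List Char) (off : Nat) (s : List Char),
    off + cells.length ≤ s.length →
    ((PySem.List.enumerate cells (off : Int)).reverse).foldl pvPairBody (s, 0)
      = ((pvRun cells off s).1, ((pvRun cells off s).2 : Int)) := by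
  intro cells
  induction cells with
  | nil => intro off s _; simp [PySem.List.enumerate_nil, pvRun]
  | cons ch rest ih =>
    intro off s hlen
    have hlen' : (off + 1) + rest.length ≤ s.length := by
      simp only [List.length_cons] at hlen; omega
    rw [PySem.List.enumerate_cons, List.reverse_cons, List.foldl_append,
      show ((off : Int) + 1) = (((off + 1 : Nat)) : Int) by push_cast; ring,
      ih (off + 1) s hlen']
    have hrl := pvRun_length rest (off + 1) s
    have hcache := pvRun_cache_le rest (off + 1) s
    simp only [List.foldl_cons, List.foldl_nil]
    by_cases h1 : ch = '#'
    · subst h1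
      rw [pvPairBody_hash, pvRun_cons_hash]
      dsimp only
      rw [pv_set_slices _ off '#' (by omega)]
      have hbody : (fun (column : List Char) (stone : Int) =>
            PySem.List.slice column none (some ((off : Int) + 1 + stone)) ++ ['O'] ++
            PySem.List.slice column (some ((off : Int) + 1 + stone + 1)) none)
          = (fun column stone => PySem.List.slice column none (some (((off + 1 : Nat) : Int) + stone)) ++ ['O'] ++
            PySem.List.slice column (some (((off + 1 : Nat) : Int) + stone + 1)) none) := by
        funext column stone
        rw [show ((off : Int) + 1 + stone) = (((off + 1 : Nat) : Int) + stone) by push_cast; ring]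
      rw [hbody, pv_stone_fold_pyRange _ (off + 1) _ (by simp only [List.length_set]; omega)]
      norm_num
    · by_cases h2 : ch = 'O'
      · subst h2
        rw [pvPairBody_O, pvRun_cons_O]
        simp
      · rw [pvPairBody_other _ _ ch h1 h2, pvRun_cons_other ch rest off s h1 h2]

theorem pv_rev_enum (cells : List Char) (mI : Int) (d : Char) (hm : mI = (cells.length : Int)) :
    (PySem.List.pyRange 0 mI 1).map
      (fun i => (mI - i - 1, PySem.List.pyGetD cells (mI - i - 1) d))
      = (PySem.List.enumerate cells 0).reverse := by
  subst hm
  apply List.ext_getElem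
  · simp [PySem.List.length_pyRange_one, PySem.List.length_enumerate]
  · intro k hk1 hk2
    have hk : k < cells.length := by
      simpa [PySem.List.length_pyRange_one] using hk1
    simp only [List.getElem_map, PySem.List.getElem_pyRange_one, List.getElem_reverse,
      PySem.List.length_enumerate, PySem.List.getElem_enumerate]
    have he : ((cells.length : Int)) - (0 + (k : Int)) - 1 = ((cells.length - 1 - k : Nat) : Int) := by
      omega
    rw [Prod.ext_iff]
    constructor
    · rw [he]; omega
    · rw [he, PySem.List.pyGetD_natCast, List.getD_eq_getElem?_getD,
        List.getElem?_eq_getElem (by omega)]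
      simp

-- B's per-step body on an explicit (line, row) pair (state: weight, next-free row).
def pvBBody (m c : Int) (st : Int × Int) (p : Int × String) : Int × Int :=
  if PySem.List.pyGetD p.2.toList c ' ' = '#' then (st.1, p.1 + 1)
  else if PySem.List.pyGetD p.2.toList c ' ' = 'O' then (st.1 + (m - st.2), st.2 + 1)
  else st

theorem pv_b_inner (m c : Int) : ∀ (rows : List String) (j w nf : Int),
    ((PySem.List.enumerate rows j).foldl (pvBBody m c) (w, nf)).1
      = w + pvTw m j nf (rows.map (fun row => PySem.List.pyGetD row.toList c ' ')) := by
  intro rows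
  induction rows with
  | nil => intro j w nf; simp [PySem.List.enumerate_nil, pvTw]
  | cons row rest ih =>
    intro j w nf
    rw [PySem.List.enumerate_cons]
    simp only [List.foldl_cons, List.map_cons]
    by_cases h1 : PySem.List.pyGetD row.toList c ' ' = '#'
    · rw [h1, pvTw_hash,
        show pvBBody m c (w, nf) (j, row) = (w, j + 1) from by simp [pvBBody, h1], ih]
    · by_cases h2 : PySem.List.pyGetD row.toList c ' ' = 'O'
      · rw [h2, pvTw_O,
          show pvBBody m c (w, nf) (j, row) = (w + (m - nf), nf + 1) from by
            simp [pvBBody, h2], ih]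
        ring
      · rw [pvTw_other m _ _ _ _ h1 h2,
          show pvBBody m c (w, nf) (j, row) = (w, nf) from by simp [pvBBody, h1, h2], ih]

theorem pv_a_fold (rows : List String) (c : Int) :
    (PySem.List.pyRange 0 ((rows.length : Int)) 1).foldl
      (fun (st : List Char × Int) i => pvPairBody st ((rows.length : Int) - i - 1,
        PySem.List.pyGetD (rows.map (fun row => PySem.List.pyGetD row.toList c ' '))
          ((rows.length : Int) - i - 1) ((fun row => PySem.List.pyGetD row.toList c ' ') "")))
      (List.replicate rows.length '.', 0)
    = ((pvRun (rows.map (fun row => PySem.List.pyGetD row.toList c ' ')) 0 (List.replicate rows.length '.')).1,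
       ((pvRun (rows.map (fun row => PySem.List.pyGetD row.toList c ' ')) 0 (List.replicate rows.length '.')).2 : Int)) := by
  have hbf := List.foldl_map
    (f := fun i : Int => ((rows.length : Int) - i - 1,
      PySem.List.pyGetD (rows.map (fun row => PySem.List.pyGetD row.toList c ' '))
        ((rows.length : Int) - i - 1) ((fun row => PySem.List.pyGetD row.toList c ' ') "")))
    (g := pvPairBody) (l := PySem.List.pyRange 0 ((rows.length : Int)) 1)
    (init := ((List.replicate rows.length '.' : List Char), (0 : Int)))
  rw [← hbf, pv_rev_enum _ _ _ (by simp)]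
  have h0 := pv_run_fold (rows.map (fun row => PySem.List.pyGetD row.toList c ' ')) 0
    (List.replicate rows.length '.') (by simp)
  simp only [Nat.cast_zero] at h0
  exact h0

theorem pv_final (S : List Char) (K : Nat) (hK : K ≤ S.length) :
    (if ((K : Nat) : Int) > 0 then
      (PySem.List.pyRange 0 ((K : Nat) : Int) 1).foldl
        (fun column stone => PySem.List.slice column none (some stone) ++ ['O'] ++
          PySem.List.slice column (some (stone + 1)) none) S
     else S) = pvWS S 0 K := by
  by_cases h : K = 0
  · subst h; norm_num [pvWS_zero]
  · rw [if_pos (by exact_mod_cast Nat.pos_of_ne_zero h)]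
    have hbody : (fun (column : List Char) (stone : Int) =>
          PySem.List.slice column none (some stone) ++ ['O'] ++
          PySem.List.slice column (some (stone + 1)) none)
        = (fun column stone => PySem.List.slice column none (some (((0 : Nat) : Int) + stone)) ++ ['O'] ++
          PySem.List.slice column (some (((0 : Nat) : Int) + stone + 1)) none) := by
      funext column stone; norm_num
    rw [hbody]
    exact pv_stone_fold_pyRange K 0 S (by omega)

set_option maxHeartbeats 1600000 in
theorem calculate_weight_north_eq_alt (input_data : List String) :
    calculate_weight_north input_data = calculate_weight_north_alt input_data := by
  simp only [calculate_weight_north, calculate_weight_north_alt]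
  apply PySem.List.foldl_congr_mem
  intro w c _
  have hfold :
      List.foldl
        (fun (st : List Char × Int) inverted_line_nr =>
        if PySem.List.pyGetD (PySem.List.pyGetD input_data (((input_data.length : Int)) - inverted_line_nr - 1) "").toList c ' ' = '.' then st
        else
          if PySem.List.pyGetD (PySem.List.pyGetD input_data (((input_data.length : Int)) - inverted_line_nr - 1) "").toList c ' ' = '#' then
            (List.foldl
              (fun column stone =>
                PySem.List.slice column none (some (((input_data.length : Int)) - inverted_line_nr - 1 + 1 + stone)) ++ ['O'] ++
                  PySem.List.slice column (some (((input_data.length : Int)) - inverted_line_nr - 1 + 1 + stone + 1)) none)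
              (PySem.List.slice (if PySem.List.pyGetD (PySem.List.pyGetD input_data (((input_data.length : Int)) - inverted_line_nr - 1) "").toList c ' ' = 'O' then (st.1, st.2 + 1) else st).1 none (some (((input_data.length : Int)) - inverted_line_nr - 1)) ++ ['#'] ++
                PySem.List.slice (if PySem.List.pyGetD (PySem.List.pyGetD input_data (((input_data.length : Int)) - inverted_line_nr - 1) "").toList c ' ' = 'O' then (st.1, st.2 + 1) else st).1 (some (((input_data.length : Int)) - inverted_line_nr - 1 + 1)) none)
              (PySem.List.pyRange 0 (if PySem.List.pyGetD (PySem.List.pyGetD input_data (((input_data.length : Int)) - inverted_line_nr - 1) "").toList c ' ' = 'O' then (st.1, st.2 + 1) else st).2 1), 0)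
          else
            if PySem.List.pyGetD (PySem.List.pyGetD input_data (((input_data.length : Int)) - inverted_line_nr - 1) "").toList c ' ' = 'O' then (st.1, st.2 + 1) else st)
        (create_prototype_line ((input_data.length : Int)), 0)
        (PySem.List.pyRange 0 ((input_data.length : Int)) 1)
      = ((pvRun (input_data.map (fun row => PySem.List.pyGetD row.toList c ' ')) 0
            (List.replicate input_data.length '.')).1,
         ((pvRun (input_data.map (fun row => PySem.List.pyGetD row.toList c ' ')) 0
            (List.replicate input_data.length '.')).2 : Int)) := by
    rw [pv_proto input_data.length]
    refine Eq.trans (PySem.List.foldl_congr_mem _ _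
      (fun (st : List Char × Int) i => pvPairBody st ((input_data.length : Int) - i - 1,
        PySem.List.pyGetD (input_data.map (fun row => PySem.List.pyGetD row.toList c ' '))
          ((input_data.length : Int) - i - 1) ((fun row => PySem.List.pyGetD row.toList c ' ') "")))
      _ ?_) (pv_a_fold input_data c)
    intro st i _
    dsimp only
    rw [PySem.List.pyGetD_map (fun row => PySem.List.pyGetD row.toList c ' ') input_data
      (((input_data.length : Int)) - i - 1) ""]
    rfl
  rw [hfold]
  dsimp only
  have hlen1 : (pvRun (input_data.map (fun row => PySem.List.pyGetD row.toList c ' ')) 0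
      (List.replicate input_data.length '.')).1.length = input_data.length := by
    rw [pvRun_length, List.length_replicate]
  rw [pv_final _ _ (by
    rw [hlen1]
    have := pvRun_cache_le (input_data.map (fun row => PySem.List.pyGetD row.toList c ' ')) 0
      (List.replicate input_data.length '.')
    simpa using this)]
  rw [pv_gcw, pvWS_length, hlen1]
  rw [pvRun_wAux ((input_data.length : Int))
    (input_data.map (fun row => PySem.List.pyGetD row.toList c ' ')) 0 0
    (List.replicate input_data.length '.') (le_refl 0) (by simp)
    (fun i _ hi2 => by
      rw [List.getElem?_replicate, if_pos (by simpa using hi2)])]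
  rw [pvWAux_replicate]
  simp only [Nat.cast_zero, zero_add]
  show _ = (List.foldl
      (fun (st : Int × Int) y => pvBBody ((input_data.length : Int)) c st
        (y, PySem.List.pyGetD input_data y ""))
      (w, 0) (PySem.List.pyRange 0 ((input_data.length : Int)) 1)).1
  have hb := PySem.List.enumerate_eq_map_pyRange input_data ""
  rw [PySem.List.len_eq] at hb
  have hbf := List.foldl_map (f := fun j : Int => (j, PySem.List.pyGetD input_data j ""))
    (g := pvBBody ((input_data.length : Int)) c)
    (l := PySem.List.pyRange 0 ((input_data.length : Int)) 1)
    (init := ((w : Int), (0 : Int)))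
  rw [← hb] at hbf
  rw [← hbf, pv_b_inner]

-- ===== VERDICT (by name: the statement is the Claim_ definition above) =====
theorem calculate_weight_north_spec : Claim_equal_calculate_weight_north := by
  intro input_data _ _
  exact calculate_weight_north_eq_alt input_data
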